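-- pv_equiv track=rewrite | github.com/CaZaNOx/ChangeOnt | tools/deepread_blindspots.py | ranges_from_hits
-- ===== SOURCE A (Python) =====
-- def ranges_from_hits(total_lines: int, hits: list[int], max_gap=200):
--     # Build ranges of consecutive no-hit segments with length >= max_gap
--     hit_set = set(hits)
--     no_ranges = []
--     start = None
--     for i in range(1, total_lines + 1):
--         if i not in hit_set:
--             if start is None:
--                 start = i
--         else:
--             if start is not None:
--                 end = i - 1
--                 if end - start + 1 >= max_gap:
--                     no_ranges.append((start, end))
--                 start = None
--     if start is not None:
--         end = total_lines
--         if end - start + 1 >= max_gap: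
--             no_ranges.append((start, end))
--     return no_ranges
-- ===== SOURCE B (Python) =====
-- def ranges_from_hits(total_lines: int, hits: list[int], max_gap=200):
--     # Gap-based: sort the distinct in-range hits and emit the no-hit stretches
--     # between consecutive hits (and at the boundaries) when long enough.
--     hs = sorted({h for h in hits if 1 <= h <= total_lines})
--     out = []
--     prev = 0
--     for h in hs:
--         length = h - prev - 1
--         if length >= max_gap and length >= 1:
--             out.append((prev + 1, h - 1))
--         prev = h
--     length = total_lines - prev
--     if length >= max_gap and length >= 1:
--         out.append((prev + 1, total_lines))
--     return out
-- ===== Notes on version B (the rewrite author's own statement) =====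
-- stated objective: faster
-- what changed: B sorts the distinct in-range hits and emits the gaps between consecutive hits (and the boundaries) that meet the length threshold, instead of A's scan over every line number from 1 to total_lines.
import Mathlib
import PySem

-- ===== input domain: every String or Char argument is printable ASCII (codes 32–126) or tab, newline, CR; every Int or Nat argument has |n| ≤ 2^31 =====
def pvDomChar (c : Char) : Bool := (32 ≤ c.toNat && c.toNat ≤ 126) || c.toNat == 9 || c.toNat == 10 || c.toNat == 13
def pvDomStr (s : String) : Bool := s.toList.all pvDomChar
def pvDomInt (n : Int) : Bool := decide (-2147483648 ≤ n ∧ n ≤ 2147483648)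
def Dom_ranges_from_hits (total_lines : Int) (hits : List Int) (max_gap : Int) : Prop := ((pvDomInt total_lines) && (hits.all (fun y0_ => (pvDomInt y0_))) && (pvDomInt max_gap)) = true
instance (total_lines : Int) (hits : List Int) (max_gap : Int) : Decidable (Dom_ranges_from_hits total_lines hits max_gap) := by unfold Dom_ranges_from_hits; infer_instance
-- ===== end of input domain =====

-- B replaces A's scan over every line number 1..total_lines by sorting the distinct
-- in-range hits and emitting the long-enough gaps between consecutive hits (faster
-- when total_lines is large compared to the number of hits).

-- ===== PORT A =====
-- A's loop body: for i, 'if i not in hit_set: set start if unset; else: close an open segment'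
def stepA (S : List Int) (mg : Int) (st : List (Int × Int) × Option Int) (i : Int) :
    List (Int × Int) × Option Int :=
  if !(S.contains i) then
    match st.2 with
    | none => (st.1, some i)
    | some _ => st
  else
    match st.2 with
    | some start => ((if i - 1 - start + 1 ≥ mg then st.1 ++ [(start, i - 1)] else st.1), none)
    | none => st

def ranges_from_hits (total_lines : Int) (hits : List Int) (max_gap : Int) : List (Int × Int) :=
  let hit_set : List Int := PySem.Set.ofList hits
  let st := (PySem.List.pyRange 1 (total_lines + 1) 1).foldl (stepA hit_set max_gap) ([], none)
  match st.2 with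
  | some start => if total_lines - start + 1 ≥ max_gap then st.1 ++ [(start, total_lines)] else st.1
  | none => st.1

-- ===== PORT B =====
-- B's loop body: for each sorted distinct hit h, emit (prev+1, h-1) if the gap is long enough
def stepB (mg : Int) (st : List (Int × Int) × Int) (h : Int) : List (Int × Int) × Int :=
  let len := h - st.2 - 1
  ((if len ≥ mg ∧ len ≥ 1 then st.1 ++ [(st.2 + 1, h - 1)] else st.1), h)

def ranges_from_hits_alt (total_lines : Int) (hits : List Int) (max_gap : Int) : List (Int × Int) :=
  let hs := PySem.List.sorted
    (PySem.Set.ofList (hits.filter (fun h => decide (1 ≤ h) && decide (h ≤ total_lines))))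
    (fun x => x) false
  let st := hs.foldl (stepB max_gap) ([], 0)
  let len := total_lines - st.2
  if len ≥ max_gap ∧ len ≥ 1 then st.1 ++ [(st.2 + 1, total_lines)] else st.1

-- ===== PRECONDITION & SPEC =====
def Spec_ranges_from_hits (total_lines : Int) (hits : List Int) (max_gap : Int) (out : List (Int × Int)) : Prop := out = ranges_from_hits_alt total_lines hits max_gap
instance (total_lines : Int) (hits : List Int) (max_gap : Int) (out : List (Int × Int)) : Decidable (Spec_ranges_from_hits total_lines hits max_gap out) := by unfold Spec_ranges_from_hits; infer_instance

-- ===== CLAIM (what is proved, stated in full; the proofs are below) =====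
def Claim_equal_ranges_from_hits : Prop := ∀ (total_lines : Int) (hits : List Int) (max_gap : Int), Dom_ranges_from_hits total_lines hits max_gap → Spec_ranges_from_hits total_lines hits max_gap (ranges_from_hits total_lines hits max_gap)

-- ===== LEMMAS AND PROOFS =====

-- A's final segment handling, as a function of the loop's final state
def finishA (N mg : Int) (st : List (Int × Int) × Option Int) : List (Int × Int) :=
  match st.2 with
  | some s => if N - s + 1 ≥ mg then st.1 ++ [(s, N)] else st.1
  | none => st.1

-- B's final gap handling
def finishB (N mg : Int) (st : List (Int × Int) × Int) : List (Int × Int) :=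
  if N - st.2 ≥ mg ∧ N - st.2 ≥ 1 then st.1 ++ [(st.2 + 1, N)] else st.1

-- Scanning a hit-free block only opens a segment (at its first line) if none is open.
lemma scan_nohit (S : List Int) (mg : Int) :
    ∀ (k : Nat) (a : Int) (acc : List (Int × Int)) (st0 : Option Int),
    (∀ i : Int, a ≤ i → i < a + k → S.contains i = false) →
    (PySem.List.pyRange a (a + (k : Int)) 1).foldl (stepA S mg) (acc, st0)
      = (acc, match st0 with | some s => some s | none => if k = 0 then none else some a) := by
  intro k
  induction k with
  | zero =>
    intro a acc st0 _
    rw [PySem.List.pyRange_one_eq_nil (by omega)]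
    cases st0 <;> simp
  | succ k ih =>
    intro a acc st0 hfree
    rw [PySem.List.pyRange_one_cons (by omega)]
    have hna : a ∉ S := by simpa using hfree a le_rfl (by omega)
    rw [show (a + ((Nat.succ k : Nat) : Int)) = (a + 1) + (k : Int) by push_cast; ring]
    cases st0 with
    | none =>
      rw [List.foldl_cons, show stepA S mg (acc, none) a = (acc, some a) from by
        simp [stepA, hna]]
      rw [ih (a + 1) acc (some a) (fun i h1 h2 => hfree i (by omega) (by push_cast; omega))]
      simp
    | some s =>
      rw [List.foldl_cons, show stepA S mg (acc, some s) a = (acc, some s) from by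
        simp [stepA, hna]]
      rw [ih (a + 1) acc (some s) (fun i h1 h2 => hfree i (by omega) (by push_cast; omega))]

-- Main loop correspondence: scanning lines (prev, N] against hit set S equals
-- folding B's step over the sorted hit list hs of exactly the hits in (prev, N].
lemma scan_eq (S : List Int) (mg N : Int) :
    ∀ (hs : List Int) (prev : Int) (acc : List (Int × Int)),
    List.Pairwise (· < ·) hs →
    (∀ i : Int, prev < i → i ≤ N → (S.contains i = true ↔ i ∈ hs)) →
    (∀ h ∈ hs, prev < h ∧ h ≤ N) →
    finishA N mg ((PySem.List.pyRange (prev + 1) (N + 1) 1).foldl (stepA S mg) (acc, none))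
      = finishB N mg (hs.foldl (stepB mg) (acc, prev)) := by
  intro hs
  induction hs with
  | nil =>
    intro prev acc _ hmem _
    have hfree : ∀ i : Int, prev + 1 ≤ i → i < N + 1 → S.contains i = false := by
      intro i h1 h2
      have hni : i ∉ S := by simpa using hmem i (by omega) (by omega)
      simpa using hni
    by_cases hle : N ≤ prev
    · rw [PySem.List.pyRange_one_eq_nil (by omega)]
      simp [finishA, finishB, show ¬(N - prev ≥ mg ∧ N - prev ≥ 1) from by omega]
    · have hk : N + 1 = (prev + 1) + ((N - prev).toNat : Int) := by omega
      rw [hk, scan_nohit S mg (N - prev).toNat (prev + 1) acc none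
        (fun i h1 h2 => hfree i h1 (by omega))]
      have hk0 : (N - prev).toNat ≠ 0 := by omega
      simp only [hk0, ite_false]
      simp [finishA, finishB]
      have h1 : N - (prev + 1) + 1 = N - prev := by ring
      have h2 : N - prev ≥ 1 := by omega
      rw [h1]
      split_ifs with hmg hmg2 hmg3
      · rfl
      · exact absurd ⟨hmg, h2⟩ hmg2
      · exact absurd hmg3.1 hmg
      · rfl
  | cons h rest ih =>
    intro prev acc hpw hmem hbnd
    obtain ⟨hph, hhN⟩ := hbnd h (by simp)
    have hrest_gt : ∀ r ∈ rest, h < r := by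
      intro r hr; exact (List.pairwise_cons.mp hpw).1 r hr
    -- split the scanned range at the hit h
    rw [PySem.List.pyRange_one_append (prev + 1) (h + 1) (N + 1) (by omega) (by omega)]
    rw [List.foldl_append]
    rw [PySem.List.pyRange_one_succ_right (by omega)]
    rw [List.foldl_append]
    -- the block before h is hit-free
    have hfree : ∀ i : Int, prev + 1 ≤ i → i < h → S.contains i = false := by
      intro i h1 h2
      have hi := hmem i (by omega) (by omega)
      by_contra hc
      have : S.contains i = true := by
        cases hx : S.contains i
        · exact absurd hx hc
        · rfl
      have : i ∈ h :: rest := hi.mp this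
      rcases List.mem_cons.mp this with he | hr
      · omega
      · have := hrest_gt i hr; omega
    have hkh : h = (prev + 1) + ((h - (prev + 1)).toNat : Int) := by omega
    rw [hkh, scan_nohit S mg (h - (prev + 1)).toNat (prev + 1) acc none
      (fun i h1 h2 => hfree i h1 (by omega))]
    rw [← hkh]
    have hSh : S.contains h = true := (hmem h hph hhN).mpr (by simp)
    -- the step at h closes (or never opened) the segment, matching stepB
    have hmemS : h ∈ S := by simpa using hSh
    have hstep : List.foldl (stepA S mg) (acc,
        match (none : Option Int) with
        | some s => some s
        | none => if (h - (prev + 1)).toNat = 0 then none else some (prev + 1)) [h]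
        = ((stepB mg (acc, prev) h).1, none) := by
      by_cases h0 : (h - (prev + 1)).toNat = 0
      · have heq : h = prev + 1 := by omega
        simp [stepA, stepB, heq ▸ hmemS, heq]
      · simp [h0, stepA, stepB, hmemS]
        split_ifs <;> first | rfl | (exfalso; omega)
    rw [hstep]
    -- recurse on the rest of the hits
    have := ih h (stepB mg (acc, prev) h).1 (List.pairwise_cons.mp hpw).2
      (by
        intro i hi1 hi2
        rw [hmem i (by omega) hi2]
        constructor
        · intro hx
          rcases List.mem_cons.mp hx with he | hr
          · omega
          · exact hr
        · intro hx; exact List.mem_cons.mpr (Or.inr hx))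
      (by
        intro r hr
        exact ⟨hrest_gt r hr, (hbnd r (List.mem_cons.mpr (Or.inr hr))).2⟩)
    rw [List.foldl_cons]
    have hpair : stepB mg (acc, prev) h = ((stepB mg (acc, prev) h).1, h) := by
      simp [stepB]
    rw [hpair]
    exact this

-- ===== VERDICT (by name: the statement is the Claim_ definition above) =====
theorem ranges_from_hits_spec : Claim_equal_ranges_from_hits := by
  intro N hits mg _
  show ranges_from_hits N hits mg = ranges_from_hits_alt N hits mg
  have hA : ranges_from_hits N hits mg
      = finishA N mg ((PySem.List.pyRange (0 + 1) (N + 1) 1).foldl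
          (stepA (PySem.Set.ofList hits) mg) ([], none)) := by
    norm_num [ranges_from_hits, finishA]
  have hB : ranges_from_hits_alt N hits mg
      = finishB N mg ((PySem.List.sorted
          (PySem.Set.ofList (hits.filter (fun h => decide (1 ≤ h) && decide (h ≤ N))))
          (fun x => x) false).foldl (stepB mg) ([], 0)) := by
    simp [ranges_from_hits_alt, finishB]
  rw [hA, hB]
  refine scan_eq (PySem.Set.ofList hits) mg N _ 0 [] ?_ ?_ ?_
  · exact PySem.List.sorted_ofList_pairwise_lt
      (hits.filter (fun h => decide (1 ≤ h) && decide (h ≤ N)))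
  · intro i hi1 hi2
    simp [PySem.List.mem_sorted, PySem.Set.mem_ofList, List.mem_filter]
    intro _; omega
  · intro h hh
    simp [PySem.List.mem_sorted, PySem.Set.mem_ofList, List.mem_filter] at hh
    omega
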